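-- pv_equiv track=rewrite | github.com/TheAnsarya/dq3r-info | tools/analysis/graphics_analyzer.py | _classify_graphics_function
-- ===== SOURCE A (Python) =====
-- from typing import Dict, List, Tuple, Any, Optional
--
-- def _classify_graphics_function(
-- 	ppu_regs: List[str], instructions: List[Dict]
-- ) -> str:
-- 	"""Classify the purpose of a graphics function"""
-- 	if any(reg in ppu_regs for reg in ["OAMADDL", "OAMADDH", "OAMDATA"]):
-- 		return "Sprite/OAM management"
-- 	elif any(reg in ppu_regs for reg in ["VMAIN", "VMADD", "VMDATA"]):
-- 		return "VRAM data transfer"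
-- 	elif any(reg in ppu_regs for reg in ["CGADD", "CGDATA"]):
-- 		return "Palette management"
-- 	elif any(
-- 		reg in ppu_regs for reg in ["BGMODE", "BG1SC", "BG2SC", "BG3SC", "BG4SC"]
-- 	):
-- 		return "Background configuration"
-- 	elif "INIDISP" in ppu_regs:
-- 		return "Display control"
-- 	elif any(
-- 		reg in ppu_regs for reg in ["BG1HOFS", "BG1VOFS", "BG2HOFS", "BG2VOFS"]
-- 	):
-- 		return "Background scrolling"
-- 	else:
-- 		return "General graphics operation"
-- ===== SOURCE B (Python) =====
-- # Single pass over ppu_regs keeping the minimum rule priority, then one table lookup.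
-- PRIORITY = {
--     "OAMADDL": 0, "OAMADDH": 0, "OAMDATA": 0,
--     "VMAIN": 1, "VMADD": 1, "VMDATA": 1,
--     "CGADD": 2, "CGDATA": 2,
--     "BGMODE": 3, "BG1SC": 3, "BG2SC": 3, "BG3SC": 3, "BG4SC": 3,
--     "INIDISP": 4,
--     "BG1HOFS": 5, "BG1VOFS": 5, "BG2HOFS": 5, "BG2VOFS": 5,
-- }
-- LABELS = [
--     "Sprite/OAM management",
--     "VRAM data transfer",
--     "Palette management",
--     "Background configuration",
--     "Display control",
--     "Background scrolling",
--     "General graphics operation",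
-- ]
--
--
-- def _classify_graphics_function(ppu_regs, instructions):
--     best = 6
--     for reg in ppu_regs:
--         best = min(best, PRIORITY.get(reg, 6))
--     return LABELS[best]
-- ===== Notes on version B (the rewrite author's own statement) =====
-- stated objective: alternative
-- what changed: Instead of A's cascade of per-group scans of ppu_regs, B makes one pass over ppu_regs folding the minimum priority assigned to each register by a priority map, then returns the label at that index.
import Mathlib
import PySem

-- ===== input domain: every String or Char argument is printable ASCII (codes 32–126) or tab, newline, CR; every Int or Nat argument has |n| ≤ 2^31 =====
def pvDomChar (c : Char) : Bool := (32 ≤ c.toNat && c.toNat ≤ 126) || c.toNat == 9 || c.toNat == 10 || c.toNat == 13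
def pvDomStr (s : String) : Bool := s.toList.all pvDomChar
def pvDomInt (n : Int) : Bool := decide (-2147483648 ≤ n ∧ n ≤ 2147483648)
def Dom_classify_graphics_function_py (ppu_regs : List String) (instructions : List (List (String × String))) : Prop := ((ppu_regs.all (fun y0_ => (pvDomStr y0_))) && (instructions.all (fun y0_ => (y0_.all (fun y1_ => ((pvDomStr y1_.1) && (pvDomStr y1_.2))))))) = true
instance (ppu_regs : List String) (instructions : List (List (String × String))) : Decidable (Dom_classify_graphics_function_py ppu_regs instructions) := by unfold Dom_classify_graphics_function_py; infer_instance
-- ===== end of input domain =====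

-- B replaces A's cascade of per-group scans by a single fold over ppu_regs that keeps
-- the minimum priority from a register→priority map, followed by one label lookup (alternative).

-- ===== PORT A =====
def classify_graphics_function_py (ppu_regs : List String) (instructions : List (List (String × String))) : String :=
  if ["OAMADDL", "OAMADDH", "OAMDATA"].any (fun reg => ppu_regs.contains reg) then
    "Sprite/OAM management"
  else if ["VMAIN", "VMADD", "VMDATA"].any (fun reg => ppu_regs.contains reg) then
    "VRAM data transfer"
  else if ["CGADD", "CGDATA"].any (fun reg => ppu_regs.contains reg) then
    "Palette management"
  else if ["BGMODE", "BG1SC", "BG2SC", "BG3SC", "BG4SC"].any (fun reg => ppu_regs.contains reg) then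
    "Background configuration"
  else if ppu_regs.contains "INIDISP" then
    "Display control"
  else if ["BG1HOFS", "BG1VOFS", "BG2HOFS", "BG2VOFS"].any (fun reg => ppu_regs.contains reg) then
    "Background scrolling"
  else
    "General graphics operation"

-- ===== PORT B =====
def pvPRIORITY : PySem.Dict String Int :=
  PySem.Dict.ofList
    [("OAMADDL", 0), ("OAMADDH", 0), ("OAMDATA", 0),
     ("VMAIN", 1), ("VMADD", 1), ("VMDATA", 1),
     ("CGADD", 2), ("CGDATA", 2),
     ("BGMODE", 3), ("BG1SC", 3), ("BG2SC", 3), ("BG3SC", 3), ("BG4SC", 3),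
     ("INIDISP", 4),
     ("BG1HOFS", 5), ("BG1VOFS", 5), ("BG2HOFS", 5), ("BG2VOFS", 5)]

def pvLABELS : List String :=
  ["Sprite/OAM management", "VRAM data transfer", "Palette management",
   "Background configuration", "Display control", "Background scrolling",
   "General graphics operation"]

def classify_graphics_function_py_alt (ppu_regs : List String) (instructions : List (List (String × String))) : String :=
  -- the for loop: best = min(best, PRIORITY.get(reg, 6))
  let best := ppu_regs.foldl (fun b reg => min b (PySem.Dict.getD pvPRIORITY reg 6)) 6
  -- LABELS[best]: best is always in [0, 6], so the index is in range and getD's default is unreachable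
  (PySem.List.pyGet? pvLABELS best).getD ""

-- ===== PRECONDITION & SPEC =====
def Spec_classify_graphics_function_py (ppu_regs : List String) (instructions : List (List (String × String))) (out : String) : Prop := out = classify_graphics_function_py_alt ppu_regs instructions
instance (ppu_regs : List String) (instructions : List (List (String × String))) (out : String) : Decidable (Spec_classify_graphics_function_py ppu_regs instructions out) := by unfold Spec_classify_graphics_function_py; infer_instance

-- ===== CLAIM (what is proved, stated in full; the proofs are below) =====
def Claim_equal_classify_graphics_function_py : Prop := ∀ (ppu_regs : List String) (instructions : List (List (String × String))), Dom_classify_graphics_function_py ppu_regs instructions → Spec_classify_graphics_function_py ppu_regs instructions (classify_graphics_function_py ppu_regs instructions)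

-- ===== LEMMAS AND PROOFS =====

-- membership in the six register groups, as boolean predicates
def pvInG0 (r : String) : Bool := r == "OAMADDL" || r == "OAMADDH" || r == "OAMDATA"
def pvInG1 (r : String) : Bool := r == "VMAIN" || r == "VMADD" || r == "VMDATA"
def pvInG2 (r : String) : Bool := r == "CGADD" || r == "CGDATA"
def pvInG3 (r : String) : Bool := r == "BGMODE" || r == "BG1SC" || r == "BG2SC" || r == "BG3SC" || r == "BG4SC"
def pvInG4 (r : String) : Bool := r == "INIDISP"
def pvInG5 (r : String) : Bool := r == "BG1HOFS" || r == "BG1VOFS" || r == "BG2HOFS" || r == "BG2VOFS"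

-- the if-chain on six flags shared by pvPrio and pvCascade below
def pvIdx (b0 b1 b2 b3 b4 b5 : Bool) : Int :=
  if b0 then 0 else if b1 then 1 else if b2 then 2
  else if b3 then 3 else if b4 then 4 else if b5 then 5 else 6

-- B's per-register priority as a plain if-chain on the register name
def pvPrio (r : String) : Int :=
  pvIdx (pvInG0 r) (pvInG1 r) (pvInG2 r) (pvInG3 r) (pvInG4 r) (pvInG5 r)

theorem pvPrio_eq (r : String) : PySem.Dict.getD pvPRIORITY r 6 = pvPrio r := by
  cases h0 : pvInG0 r with
  | true =>
      simp only [pvInG0, Bool.or_eq_true, beq_iff_eq] at h0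
      rcases h0 with (rfl | rfl) | rfl <;> decide
  | false =>
  cases h1 : pvInG1 r with
  | true =>
      simp only [pvInG1, Bool.or_eq_true, beq_iff_eq] at h1
      rcases h1 with (rfl | rfl) | rfl <;> decide
  | false =>
  cases h2 : pvInG2 r with
  | true =>
      simp only [pvInG2, Bool.or_eq_true, beq_iff_eq] at h2
      rcases h2 with rfl | rfl <;> decide
  | false =>
  cases h3 : pvInG3 r with
  | true =>
      simp only [pvInG3, Bool.or_eq_true, beq_iff_eq] at h3
      rcases h3 with (((rfl | rfl) | rfl) | rfl) | rfl <;> decide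
  | false =>
  cases h4 : pvInG4 r with
  | true =>
      simp only [pvInG4, beq_iff_eq] at h4
      subst h4; decide
  | false =>
  cases h5 : pvInG5 r with
  | true =>
      simp only [pvInG5, Bool.or_eq_true, beq_iff_eq] at h5
      rcases h5 with ((rfl | rfl) | rfl) | rfl <;> decide
  | false =>
      have hprio : pvPrio r = 6 := by simp [pvPrio, pvIdx, h0, h1, h2, h3, h4, h5]
      rw [hprio]
      simp only [pvInG0, pvInG1, pvInG2, pvInG3, pvInG4, pvInG5, Bool.or_eq_false_iff,
        beq_eq_false_iff_ne, ne_eq] at h0 h1 h2 h3 h4 h5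
      obtain ⟨⟨a1, a2⟩, a3⟩ := h0; obtain ⟨⟨b1, b2⟩, b3⟩ := h1; obtain ⟨c1, c2⟩ := h2
      obtain ⟨⟨⟨⟨d1, d2⟩, d3⟩, d4⟩, d5⟩ := h3; obtain ⟨⟨⟨e1, e2⟩, e3⟩, e4⟩ := h5
      have hd : pvPRIORITY = PySem.Dict.mk
          [("OAMADDL", 0), ("OAMADDH", 0), ("OAMDATA", 0),
           ("VMAIN", 1), ("VMADD", 1), ("VMDATA", 1),
           ("CGADD", 2), ("CGDATA", 2),
           ("BGMODE", 3), ("BG1SC", 3), ("BG2SC", 3), ("BG3SC", 3), ("BG4SC", 3),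
           ("INIDISP", 4),
           ("BG1HOFS", 5), ("BG1VOFS", 5), ("BG2HOFS", 5), ("BG2VOFS", 5)] := by rfl
      rw [hd]
      simp [PySem.Dict.getD, PySem.Dict.get?_mk_cons, PySem.Dict.get?, beq_iff_eq,
        Ne.symm a1, Ne.symm a2, Ne.symm a3, Ne.symm b1, Ne.symm b2, Ne.symm b3,
        Ne.symm c1, Ne.symm c2, Ne.symm d1, Ne.symm d2, Ne.symm d3, Ne.symm d4, Ne.symm d5,
        Ne.symm h4, Ne.symm e1, Ne.symm e2, Ne.symm e3, Ne.symm e4]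

-- the index that A's cascade selects, as a function of the six group flags
def pvCascade (xs : List String) : Int :=
  pvIdx (xs.any pvInG0) (xs.any pvInG1) (xs.any pvInG2)
    (xs.any pvInG3) (xs.any pvInG4) (xs.any pvInG5)

theorem pvIdx_or (a0 a1 a2 a3 a4 a5 b0 b1 b2 b3 b4 b5 : Bool) :
    pvIdx (a0 || b0) (a1 || b1) (a2 || b2) (a3 || b3) (a4 || b4) (a5 || b5)
      = min (pvIdx a0 a1 a2 a3 a4 a5) (pvIdx b0 b1 b2 b3 b4 b5) := by
  revert a0 a1 a2 a3 a4 a5 b0 b1 b2 b3 b4 b5; decide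

theorem pvCascade_cons (r : String) (t : List String) :
    pvCascade (r :: t) = min (pvPrio r) (pvCascade t) := by
  unfold pvCascade pvPrio
  simp only [List.any_cons]
  exact pvIdx_or _ _ _ _ _ _ _ _ _ _ _ _

theorem pv_fold_min_acc (xs : List String) (b c : Int) :
    xs.foldl (fun b reg => min b (pvPrio reg)) (min b c) =
      min b (xs.foldl (fun b reg => min b (pvPrio reg)) c) := by
  induction xs generalizing b c with
  | nil => simp
  | cons r t ih =>
      simp only [List.foldl_cons, min_assoc, ih]

theorem pv_fold_eq_cascade (xs : List String) :
    xs.foldl (fun b reg => min b (pvPrio reg)) 6 = pvCascade xs := by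
  induction xs with
  | nil => simp [pvCascade, pvIdx]
  | cons r t ih =>
      rw [List.foldl_cons, min_comm (6 : Int) (pvPrio r), pv_fold_min_acc, ih, pvCascade_cons]

-- A scans each group for membership in ppu_regs; reorder it to a scan of ppu_regs
theorem pv_any_swap (g xs : List String) (p : String -> Bool)
    (hp : forall r, p r = g.contains r) :
    (g.any fun reg => xs.contains reg) = xs.any p := by
  rw [Bool.eq_iff_iff]
  simp only [List.any_eq_true, List.contains_eq_mem, decide_eq_true_eq, hp]
  constructor <;> rintro ⟨x, hx, hy⟩ <;> exact ⟨x, hy, hx⟩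

-- ===== VERDICT (by name: the statement is the Claim_ definition above) =====
theorem classify_graphics_function_py_spec : Claim_equal_classify_graphics_function_py := by
  intro ppu_regs instructions _
  show _ = _
  have e0 : (["OAMADDL", "OAMADDH", "OAMDATA"].any fun reg => ppu_regs.contains reg)
      = ppu_regs.any pvInG0 := pv_any_swap _ _ _ (fun r => by rw [Bool.eq_iff_iff]; simp [pvInG0]; try tauto)
  have e1 : (["VMAIN", "VMADD", "VMDATA"].any fun reg => ppu_regs.contains reg)
      = ppu_regs.any pvInG1 := pv_any_swap _ _ _ (fun r => by rw [Bool.eq_iff_iff]; simp [pvInG1]; try tauto)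
  have e2 : (["CGADD", "CGDATA"].any fun reg => ppu_regs.contains reg)
      = ppu_regs.any pvInG2 := pv_any_swap _ _ _ (fun r => by rw [Bool.eq_iff_iff]; simp [pvInG2]; try tauto)
  have e3 : (["BGMODE", "BG1SC", "BG2SC", "BG3SC", "BG4SC"].any fun reg => ppu_regs.contains reg)
      = ppu_regs.any pvInG3 := pv_any_swap _ _ _ (fun r => by rw [Bool.eq_iff_iff]; simp [pvInG3]; try tauto)
  have e4 : ppu_regs.contains "INIDISP" = ppu_regs.any pvInG4 := by
    rw [Bool.eq_iff_iff]
    simp only [List.any_eq_true, List.contains_eq_mem, decide_eq_true_eq, pvInG4, beq_iff_eq]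
    constructor
    · intro h; exact ⟨_, h, rfl⟩
    · rintro ⟨x, hx, rfl⟩; exact hx
  have e5 : (["BG1HOFS", "BG1VOFS", "BG2HOFS", "BG2VOFS"].any fun reg => ppu_regs.contains reg)
      = ppu_regs.any pvInG5 := pv_any_swap _ _ _ (fun r => by rw [Bool.eq_iff_iff]; simp [pvInG5]; try tauto)
  simp only [classify_graphics_function_py, classify_graphics_function_py_alt, pvPrio_eq,
    pv_fold_eq_cascade, pvCascade, pvIdx, e0, e1, e2, e3, e4, e5]
  split_ifs <;> rfl
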